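-- pv_equiv track=rewrite | github.com/W-CodeTest-Study/23-CodeTest-Study | Hcmins/p161989.py | solution
-- ===== SOURCE A (Python) =====
-- def solution(n, m, section):
--     answer = 0
--     maxinum = section[0]
--     index = 0  # 아직 안칠한 곳의 첫번째 index
--     while maxinum <= max(section):
--         maxinum += m
--         answer += 1
--         r = len(section)-1
--         while index <= r:
--             mid = (index+r+1)//2
--             if (maxinum > section[mid]):  # 이미 칠한 곳
--                 index = mid+1
--             elif (maxinum <= section[mid] and maxinum <= section[mid-1]):
--                 r = mid-1
--             else:  # 여기에서의 mid이 아직 안칠한곳의 시작지점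
--                 maxinum = section[mid]
--                 index = mid
--                 break
--     return answer
-- ===== SOURCE B (Python) =====
-- def solution(n, m, section):
--     # single-pass greedy: paint whenever the current spot is past the painted end
--     answer = 0
--     limit = section[0]  # first position not yet covered by any roll
--     for s in section:
--         if s >= limit:
--             answer += 1
--             limit = s + m
--     return answer
-- ===== Notes on version B (the rewrite author's own statement) =====
-- stated objective: faster
-- what changed: A repeatedly binary-searches for the next unpainted spot inside a while loop over the answer; B is a single left-to-right greedy pass that keeps the end of the last roll, so the nested search disappears.
-- outside the precondition, e.g. on solution(0, 2, [4, 7, 2, 9, 2, 2, 5]): A returns 2, B returns 3; on solution(0, 0, [1]): A does not finish within the time limit, B returns 1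
import Mathlib
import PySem

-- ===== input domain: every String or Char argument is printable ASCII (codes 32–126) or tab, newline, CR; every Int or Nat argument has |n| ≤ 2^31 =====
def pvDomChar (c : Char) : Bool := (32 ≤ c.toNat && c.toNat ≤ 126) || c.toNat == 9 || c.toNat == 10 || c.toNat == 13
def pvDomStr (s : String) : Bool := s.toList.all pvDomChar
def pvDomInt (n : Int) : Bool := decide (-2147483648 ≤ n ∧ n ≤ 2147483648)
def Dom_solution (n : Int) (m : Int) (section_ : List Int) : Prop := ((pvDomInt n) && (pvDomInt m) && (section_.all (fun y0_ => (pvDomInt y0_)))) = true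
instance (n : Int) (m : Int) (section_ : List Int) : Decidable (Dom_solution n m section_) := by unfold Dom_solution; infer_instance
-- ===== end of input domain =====

-- B replaces A's per-roll binary search (plus a max() recomputed every iteration) by one
-- left-to-right greedy pass tracking the painted end; equal on nonempty ascending sections with m >= 1.


-- ===== PORT A =====
-- inner `while index <= r` binary search of A; one fuel unit per iteration (the measure r - index
-- shrinks every iteration, so fuel = len + 1 is never exhausted; fuel only guards totality)
def solInner (section_ : List Int) (maxinum index r : Int) : Nat → Int × Int
  | 0 => (maxinum, index)
  | fuel + 1 =>
    if index ≤ r then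
      let mid := PySem.Int.floordiv (index + r + 1) 2
      match PySem.List.pyGet? section_ mid with
      | none => (maxinum, index)            -- Python IndexError (unreachable: 0 ≤ mid < len here)
      | some smid =>
        if maxinum > smid then
          solInner section_ maxinum (mid + 1) r fuel
        else
          match PySem.List.pyGet? section_ (mid - 1) with
          | none => (maxinum, index)        -- Python IndexError (unreachable: list nonempty)
          | some sprev =>
            if maxinum ≤ smid ∧ maxinum ≤ sprev then
              solInner section_ maxinum index (mid - 1) fuel
            else
              (smid, mid)                   -- break
    else (maxinum, index)

-- outer `while maxinum <= max(section)` loop of A; one fuel unit per iteration (index grows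
-- strictly each round on ascending input, so fuel = len + 1 is never exhausted)
def solOuter (m : Int) (section_ : List Int) (answer maxinum index : Int) : Nat → Int
  | 0 => answer
  | fuel + 1 =>
    match PySem.List.max? section_ (fun x => x) with
    | none => answer                        -- max() of empty: unreachable, section[0] raised first
    | some mx =>
      if maxinum ≤ mx then
        let p := solInner section_ (maxinum + m) index (PySem.List.len section_ - 1)
                   (section_.length + 1)
        solOuter m section_ (answer + 1) p.1 p.2 fuel
      else answer

def solution (n : Int) (m : Int) (section_ : List Int) : Int :=
  match PySem.List.pyGet? section_ 0 with
  | none => 0                               -- Python IndexError on empty section (outside Pre_)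
  | some s0 =>
    match PySem.List.max? section_ (fun x => x) with
    | none => 0                             -- unreachable: section_ is nonempty here
    | some mx =>
      -- fuel: one unit per outer iteration; whenever the Python loop terminates (m ≥ 1),
      -- maxinum grows by at least 1 per iteration, so (mx - s0 + 2) + len + 1 units never run out
      solOuter m section_ 0 s0 0 ((mx - s0 + 2).toNat + (section_.length + 1))

-- ===== PORT B =====
def solution_alt (n : Int) (m : Int) (section_ : List Int) : Int :=
  match PySem.List.pyGet? section_ 0 with
  | none => 0                               -- Python IndexError on empty section (outside Pre_)
  | some l0 =>
    (section_.foldl (fun (st : Int × Int) s => if st.2 ≤ s then (st.1 + 1, s + m) else st)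
      (0, l0)).1

-- ===== PRECONDITION & SPEC =====
-- Pre_ is the problem's natural domain: a nonempty ascending section and roller width ≥ 1
-- (short sections are admitted unconditionally). It excludes: empty section (A raises
-- IndexError), m < 1 (A's while loop never terminates), and unsorted sections of length ≥ 3,
-- on which A's binary search returns an accidental value.
def Pre_solution (n : Int) (m : Int) (section_ : List Int) : Prop :=
  section_ ≠ [] ∧ 1 ≤ m ∧ (List.Pairwise (· ≤ ·) section_ ∨ section_.length ≤ 2)
instance (n : Int) (m : Int) (section_ : List Int) : Decidable (Pre_solution n m section_) := by
  unfold Pre_solution; infer_instance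

def pvWitness_solution : Int × Int × List Int := (5, 2, [1, 4, 4, 9])

def Spec_solution (n : Int) (m : Int) (section_ : List Int) (out : Int) : Prop :=
  out = solution_alt n m section_
instance (n : Int) (m : Int) (section_ : List Int) (out : Int) : Decidable (Spec_solution n m section_ out) := by
  unfold Spec_solution; infer_instance

-- ===== CLAIM (what is proved, stated in full; the proofs are below) =====
def Claim_equal_solution : Prop := ∀ (n : Int) (m : Int) (section_ : List Int),
  Dom_solution n m section_ → Pre_solution n m section_ →
  Spec_solution n m section_ (solution n m section_)

-- ===== LEMMAS AND PROOFS =====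

-- reference greedy: paint at x (covering [x, x+m)) iff x is at or past the current limit
def greedy (m limit : Int) : List Int → Int
  | [] => 0
  | x :: xs => if limit ≤ x then 1 + greedy m (x + m) xs else greedy m limit xs

lemma sortedLe {sec : List Int} (hs : List.Pairwise (· ≤ ·) sec) {i j : Nat}
    (hj : j < sec.length) (hij : i ≤ j) : sec[i]'(lt_of_le_of_lt hij hj) ≤ sec[j] := by
  rcases Nat.lt_or_ge i j with h | h
  · exact (List.pairwise_iff_getElem.mp hs) i j _ hj h
  · have : i = j := le_antisymm hij h
    subst this; exact le_refl _

-- B's fold accumulates ans + greedy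
lemma foldl_greedy (m : Int) (xs : List Int) (ans limit : Int) :
    (xs.foldl (fun (st : Int × Int) s => if st.2 ≤ s then (st.1 + 1, s + m) else st)
      (ans, limit)).1 = ans + greedy m limit xs := by
  induction xs generalizing ans limit with
  | nil => simp [greedy]
  | cons x xs ih =>
    by_cases h : limit ≤ x
    · simp [greedy, h, ih, add_assoc]
    · simp [greedy, h, ih]

-- greedy skips every element below the limit
lemma greedy_skip (m L : Int) (sec : List Int) (i j : Nat) (hij : i ≤ j) (hj : j ≤ sec.length)
    (hlt : ∀ k : Nat, (hk : k < sec.length) → i ≤ k → k < j → sec[k] < L) :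
    greedy m L (sec.drop i) = greedy m L (sec.drop j) := by
  induction j with
  | zero => simp_all
  | succ j ih =>
    rcases Nat.lt_or_ge i (j + 1) with h | h
    · have hij' : i ≤ j := Nat.lt_succ_iff.mp h
      have hjlen : j < sec.length := hj
      rw [ih hij' (le_of_lt hjlen) (fun k hk h1 h2 => hlt k hk h1 (Nat.lt_succ_of_lt h2))]
      rw [List.drop_eq_getElem_cons hjlen]
      simp [greedy, not_le.mpr (hlt j hjlen hij' (Nat.lt_succ_self j))]
    · have : i = j + 1 := le_antisymm (by omega) h
      subst this; rfl

-- greedy with an equal head paints it regardless of the exact limit below it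
lemma greedy_head_congr (m L L' x : Int) (xs : List Int) (h : L ≤ x) (h' : L' ≤ x) :
    greedy m L (x :: xs) = greedy m L' (x :: xs) := by
  simp [greedy, h, h']

-- correctness of A's inner binary search on an ascending list
lemma inner_go (sec : List Int) (hs : List.Pairwise (· ≤ ·) sec) (L : Int) :
    ∀ (f : Nat) (index r : Int),
    0 ≤ index → r ≤ (sec.length : Int) - 1 →
    (∀ (hk : 0 < sec.length), sec[0] < L) →
    (∀ k : Nat, (hk : k < sec.length) → (k : Int) < index → sec[k] < L) →
    ((∃ k : Nat, ∃ hk : k < sec.length, (k : Int) ≤ r ∧ L ≤ sec[k]'hk)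
        ∨ r = (sec.length : Int) - 1) →
    (r - index + 1).toNat < f →
    (∃ j : Nat, ∃ hj : j < sec.length,
        solInner sec L index r f = (sec[j]'hj, (j : Int)) ∧ L ≤ sec[j]'hj ∧
        ∀ k : Nat, (hk : k < sec.length) → k < j → sec[k] < L)
    ∨ ((solInner sec L index r f).1 = L ∧
        ∀ k : Nat, (hk : k < sec.length) → sec[k] < L) := by
  intro f
  induction f with
  | zero => intro index r _ _ _ _ _ hfuel; omega
  | succ f ih =>
    intro index r hi hr h0 hpre hdisj hfuel
    by_cases hir : index ≤ r
    · have hlen : 0 < sec.length := by omega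
      have hmb := PySem.Int.floordiv_two_mid_bounds (lo := index) (hi := r + 1) (by omega)
      rw [show index + (r + 1) = index + r + 1 by ring] at hmb
      have hmidlt : PySem.Int.floordiv (index + r + 1) 2 < r + 1 :=
        (PySem.Int.floordiv_lt_iff_lt_mul (by norm_num)).mpr (by omega)
      set mid := PySem.Int.floordiv (index + r + 1) 2 with hmiddef
      obtain ⟨hm1, _⟩ := hmb
      have hmr : mid ≤ r := by omega
      have hm0 : 0 ≤ mid := le_trans hi hm1
      have hmnat : mid.toNat < sec.length := by omega
      have hget : PySem.List.pyGet? sec mid = some (sec[mid.toNat]'hmnat) :=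
        PySem.List.pyGet?_eq_some_getElem sec hm0 (by omega)
      simp only [solInner, if_pos hir, ← hmiddef, hget]
      by_cases hgt : L > sec[mid.toNat]'hmnat
      · rw [if_pos hgt]
        refine ih (mid + 1) r (by omega) hr h0 ?_ hdisj (by omega)
        intro k hk hkm
        exact lt_of_le_of_lt (sortedLe hs hmnat (by omega)) hgt
      · rw [if_neg hgt]
        have hle : L ≤ sec[mid.toNat]'hmnat := not_lt.mp hgt
        have hmid1 : 1 ≤ mid := by
          by_contra h
          have hmt : mid.toNat = 0 := by omega
          have := h0 hlen
          simp only [hmt] at hle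
          omega
        have hpnat : (mid - 1).toNat < sec.length := by omega
        have hgetp : PySem.List.pyGet? sec (mid - 1) = some (sec[(mid - 1).toNat]'hpnat) :=
          PySem.List.pyGet?_eq_some_getElem sec (by omega) (by omega)
        simp only [hgetp]
        by_cases hprev : L ≤ sec[(mid - 1).toNat]'hpnat
        · rw [if_pos ⟨hle, hprev⟩]
          refine ih index (mid - 1) hi (by omega) h0 hpre ?_ (by omega)
          exact Or.inl ⟨(mid - 1).toNat, hpnat, by omega, hprev⟩
        · rw [if_neg (fun h => hprev h.2)]
          refine Or.inl ⟨mid.toNat, hmnat, ?_, hle, ?_⟩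
          · rw [Int.toNat_of_nonneg hm0]
          · intro k hk hkm
            have hk' : k ≤ (mid - 1).toNat := by omega
            exact lt_of_le_of_lt (sortedLe hs hpnat hk') (not_le.mp hprev)
    · simp only [solInner, if_neg hir]
      refine Or.inr ⟨by trivial, ?_⟩
      intro k hk
      rcases hdisj with ⟨k0, hk0, hk0r, hLk0⟩ | hrlen
      · exact absurd (hpre k0 hk0 (by omega)) (not_lt.mpr hLk0)
      · exact hpre k hk (by omega)

-- correctness of A's outer loop: equals answer + greedy on the unpainted suffix
lemma outer_go (m : Int) (sec : List Int) (hs : List.Pairwise (· ≤ ·) sec) (hm : 1 ≤ m) :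
    ∀ (f : Nat) (answer maxinum index : Int),
    0 ≤ index →
    (∀ k : Nat, (hk : k < sec.length) → (k : Int) < index → sec[k] < maxinum) →
    (∀ (hk : index.toNat < sec.length), maxinum = sec[index.toNat]) →
    ((sec.length : Int) - index).toNat < f →
    solOuter m sec answer maxinum index f = answer + greedy m maxinum (sec.drop index.toNat) := by
  intro f
  induction f with
  | zero => intro answer maxinum index _ _ _ hfuel; omega
  | succ f ih =>
    intro answer maxinum index hi hpre hcur hfuel
    by_cases hemp : sec = []
    · subst hemp
      have hnone : PySem.List.max? ([] : List Int) (fun x => x) = none :=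
        (PySem.List.max?_eq_none_iff _ _).mpr rfl
      simp [solOuter, hnone, greedy]
    · cases hmx : PySem.List.max? sec (fun x => x) with
      | none => exact absurd ((PySem.List.max?_eq_none_iff _ _).mp hmx) hemp
      | some mx =>
        obtain ⟨k0, hk0, hk0eq⟩ := List.mem_iff_getElem.mp (PySem.List.max?_mem hmx)
        by_cases hidx : index < (sec.length : Int)
        · have hk : index.toNat < sec.length := by omega
          have hmaxi : maxinum = sec[index.toNat] := hcur hk
          have hcond : maxinum ≤ mx := by
            rw [hmaxi]
            exact PySem.List.max?_isMax hmx _ (List.getElem_mem hk)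
          have h0in : ∀ (hl : 0 < sec.length), sec[0] < maxinum + m := by
            intro hl
            have h1 := sortedLe hs hk (Nat.zero_le _)
            omega
          rcases inner_go sec hs (maxinum + m) (sec.length + 1) index ((sec.length : Int) - 1)
              hi (by omega) h0in
              (fun k hka hkb => lt_of_lt_of_le (hpre k hka hkb) (by omega))
              (Or.inr rfl) (by omega) with
            ⟨j, hj, heq, hLj, hbelow⟩ | ⟨hp1, hall⟩
          · have hjgt : index.toNat < j := by
              by_contra h
              have := sortedLe hs hk (Nat.le_of_not_lt h)
              omega
            have hrec := ih (answer + 1) (sec[j]'hj) (j : Int) (by omega)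
              (fun k hka hkb => lt_of_lt_of_le (hbelow k hka (by omega)) hLj)
              (by intro hk'; simp) (by omega)
            simp only [solOuter, hmx, if_pos hcond, PySem.List.len_eq, heq] at hrec ⊢
            simp only [Int.toNat_natCast] at hrec
            rw [hrec]
            rw [List.drop_eq_getElem_cons hk]
            have hmle : maxinum ≤ sec[index.toNat] := le_of_eq hmaxi
            simp only [greedy, if_pos hmle]
            have hskip := greedy_skip m (maxinum + m) sec (index.toNat + 1) j (by omega)
              (le_of_lt hj) (fun k hka _ h2 => hbelow k hka h2)
            rw [← hmaxi, hskip, List.drop_eq_getElem_cons hj,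
              greedy_head_congr m (maxinum + m) (sec[j]'hj) (sec[j]'hj) _ hLj (le_refl _),
              ← List.drop_eq_getElem_cons hj]
            ring
          · have hf1 : ∃ f', f = f' + 1 := ⟨f - 1, by omega⟩
            obtain ⟨f', rfl⟩ := hf1
            have hnocond : ¬ (solInner sec (maxinum + m) index ((sec.length : Int) - 1)
                (sec.length + 1)).1 ≤ mx := by
              rw [hp1]
              have := hall k0 hk0
              omega
            simp only [solOuter, hmx, if_pos hcond, PySem.List.len_eq]
            rw [if_neg hnocond]
            rw [List.drop_eq_getElem_cons hk]
            have hmle : maxinum ≤ sec[index.toNat] := le_of_eq hmaxi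
            simp only [greedy, if_pos hmle]
            have hskip := greedy_skip m (maxinum + m) sec (index.toNat + 1) sec.length
              (by omega) (le_refl _) (fun k hka _ _ => hall k hka)
            rw [← hmaxi, hskip, List.drop_length]
            simp [greedy]
        · have hnocond : ¬ maxinum ≤ mx := by
            have h1 := hpre k0 hk0 (by omega)
            omega
          have hdrop : sec.drop index.toNat = [] := by
            apply List.drop_eq_nil_of_le
            omega
          simp [solOuter, hmx, if_neg hnocond, hdrop, greedy]

-- one-step unfolding equations for the fuelled loops (used to step through literal cases)
lemma solOuter_succ (m : Int) (sec : List Int) (answer maxinum index : Int) (f : Nat) :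
    solOuter m sec answer maxinum index (f + 1) =
      match PySem.List.max? sec (fun x => x) with
      | none => answer
      | some mx =>
        if maxinum ≤ mx then
          let p := solInner sec (maxinum + m) index (PySem.List.len sec - 1) (sec.length + 1)
          solOuter m sec (answer + 1) p.1 p.2 f
        else answer := rfl

lemma solInner_succ (sec : List Int) (maxinum index r : Int) (f : Nat) :
    solInner sec maxinum index r (f + 1) =
      (if index ≤ r then
        match PySem.List.pyGet? sec (PySem.Int.floordiv (index + r + 1) 2) with
        | none => (maxinum, index)
        | some smid =>
          if maxinum > smid then
            solInner sec maxinum (PySem.Int.floordiv (index + r + 1) 2 + 1) r f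
          else
            match PySem.List.pyGet? sec (PySem.Int.floordiv (index + r + 1) 2 - 1) with
            | none => (maxinum, index)
            | some sprev =>
              if maxinum ≤ smid ∧ maxinum ≤ sprev then
                solInner sec maxinum index (PySem.Int.floordiv (index + r + 1) 2 - 1) f
              else
                (smid, PySem.Int.floordiv (index + r + 1) 2)
      else (maxinum, index)) := rfl

-- ascending sections: A = B via outer_go / foldl_greedy
lemma sorted_case (n m : Int) (sec : List Int) (hne : sec ≠ []) (hm : 1 ≤ m)
    (hs : List.Pairwise (· ≤ ·) sec) : solution n m sec = solution_alt n m sec := by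
  have hlen : 0 < sec.length := List.length_pos_iff.mpr hne
  unfold solution solution_alt
  rw [PySem.List.pyGet?_eq_some_getElem sec (le_refl 0) (by exact_mod_cast hlen)]
  cases hmx : PySem.List.max? sec (fun x => x) with
  | none => exact absurd ((PySem.List.max?_eq_none_iff _ _).mp hmx) hne
  | some mx =>
    have hA := outer_go m sec hs hm
      ((mx - sec[(0:Int).toNat]'(by simpa) + 2).toNat + (sec.length + 1))
      0 (sec[(0:Int).toNat]'(by simpa)) 0
      le_rfl (by intro k hk hk0; omega) (fun _ => rfl) (by omega)
    have hB := foldl_greedy m sec 0 (sec[(0:Int).toNat]'(by simpa))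
    simp only [Int.toNat_zero, List.drop_zero] at hA hB
    simp only [Int.toNat_zero]
    exact hA.trans hB.symm

-- descending two-element sections: both programs use exactly one roll
lemma two_desc_case (n m a b : Int) (hm : 1 ≤ m) (hba : b < a) :
    solution n m [a, b] = solution_alt n m [a, b] := by
  have hmax : PySem.List.max? [a, b] (fun x => x) = some a := by
    rw [PySem.List.max?_id_cons]
    simp [max_eq_left (le_of_lt hba)]
  unfold solution solution_alt
  rw [PySem.List.pyGet?_zero_cons, hmax]
  dsimp only
  have hfuel : ((a - a + 2).toNat + ([a, b].length + 1)) = 4 + 1 := by simp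
  rw [hfuel, solOuter_succ, hmax]
  dsimp only
  rw [if_pos (le_refl a)]
  have hinner : solInner [a, b] (a + m) 0 (PySem.List.len [a, b] - 1) ([a, b].length + 1)
      = (a + m, 2) := by
    have hlen2 : PySem.List.len [a, b] - 1 = 1 := by simp [PySem.List.len_eq]
    have h3 : ([a, b].length + 1) = 2 + 1 := by simp
    rw [hlen2, h3, solInner_succ]
    rw [if_pos (by omega : (0 : Int) ≤ 1)]
    rw [show PySem.Int.floordiv (0 + 1 + 1) 2 = 1 by decide]
    rw [PySem.List.pyGet?_eq_some_getElem [a, b] (by omega) (by simp)]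
    simp only [show ((1 : Int)).toNat = 1 from rfl]
    simp only [List.getElem_cons_succ, List.getElem_cons_zero]
    rw [if_pos (by omega : a + m > b)]
    rw [show (2 : Nat) = 1 + 1 from rfl, solInner_succ]
    rw [if_neg (by omega : ¬ (1 + 1 : Int) ≤ 1)]
    norm_num
  rw [hinner]
  dsimp only
  rw [show (4 : Nat) = 3 + 1 from rfl, solOuter_succ, hmax]
  dsimp only
  rw [if_neg (by omega : ¬ a + m ≤ a)]
  simp only [List.foldl_cons, List.foldl_nil]
  rw [if_pos (le_refl a), if_neg (by omega : ¬ a + m ≤ b)]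

-- ===== VERDICT (by name: the statement is the Claim_ definition above) =====
theorem solution_spec : Claim_equal_solution := by
  intro n m sec _ hpre
  obtain ⟨hne, hm, hsor⟩ := hpre
  unfold Spec_solution
  by_cases hs : List.Pairwise (· ≤ ·) sec
  · exact sorted_case n m sec hne hm hs
  · rcases hsor with hs' | hlen2
    · exact absurd hs' hs
    · match sec, hs, hlen2 with
      | [], hs, _ => exact absurd rfl hne
      | [a], hs, _ => exact absurd (by simp) hs
      | [a, b], hs, _ =>
        have hba : b < a := by
          by_contra h
          exact hs (by simp [List.pairwise_cons]; omega)
        exact two_desc_case n m a b hm hba
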